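-- pv_equiv track=rewrite | github.com/NicolasCamachoP/AlgorithmsAnalysisExercises | Taller Programación Dinámica/code/solLeo.py | MaxDiff_Aux
-- ===== SOURCE A (Python) =====
-- def MaxDiff_Aux(A, i):
--     if i == 0:
--         return 0
--     else:
--         l = MaxDiff_Aux(A, i - 1) + A[i - 1]
--         r = MaxDiff_Aux(A, i - 1) - A[i - 1]
--         if abs( l ) < abs ( r ):
--             return l
--         else:
--             return r
-- ===== SOURCE B (Python) =====
-- def MaxDiff_Aux(A, i):
--     s = 0
--     for k in range(i):
--         l = s + A[k]
--         r = s - A[k]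
--         s = l if abs(l) < abs(r) else r
--     return s
-- ===== Notes on version B (the rewrite author's own statement) =====
-- stated objective: simpler
-- what changed: Replaced the recursion (two identical recursive calls per level) by a single forward loop keeping only the previous running value, applying the same min-abs sign choice at each step.
import Mathlib
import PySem

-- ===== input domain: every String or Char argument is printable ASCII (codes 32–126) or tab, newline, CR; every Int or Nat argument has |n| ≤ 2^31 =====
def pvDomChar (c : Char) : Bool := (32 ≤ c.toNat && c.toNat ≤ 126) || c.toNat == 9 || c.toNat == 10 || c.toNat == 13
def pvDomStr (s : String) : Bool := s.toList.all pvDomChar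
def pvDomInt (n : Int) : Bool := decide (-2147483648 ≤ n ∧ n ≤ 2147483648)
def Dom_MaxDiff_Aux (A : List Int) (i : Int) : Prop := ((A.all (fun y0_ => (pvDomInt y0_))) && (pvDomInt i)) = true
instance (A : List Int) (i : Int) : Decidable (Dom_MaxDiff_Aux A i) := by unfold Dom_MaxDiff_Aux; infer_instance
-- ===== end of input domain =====

-- B replaces A's recursion (two identical recursive calls per level) by a single
-- forward loop keeping only the previous running value (objective: simpler).

-- ===== PORT A =====
-- Python A recurses on i; recursion depth is i for i ≥ 0 (the Nat fuel below).
-- For i < 0 Python never reaches the base case (RecursionError); for i > len(A) it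
-- raises IndexError (pyGetD's default is never used) — both are excluded by Pre_.
def MaxDiff_AuxGo (A : List Int) : Nat → Int
  | 0 => 0
  | n + 1 =>
    let l := MaxDiff_AuxGo A n + PySem.List.pyGetD A (n : Int) 0
    let r := MaxDiff_AuxGo A n - PySem.List.pyGetD A (n : Int) 0
    if |l| < |r| then l else r

def MaxDiff_Aux (A : List Int) (i : Int) : Int := MaxDiff_AuxGo A i.toNat

-- ===== PORT B =====
def MaxDiff_Aux_alt (A : List Int) (i : Int) : Int :=
  (PySem.List.pyRange 0 i 1).foldl (fun s k =>
    let l := s + PySem.List.pyGetD A k 0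
    let r := s - PySem.List.pyGetD A k 0
    if |l| < |r| then l else r) 0

-- ===== PRECONDITION & SPEC =====
-- Pre_ excludes i < 0 (A's recursion never terminates: RecursionError) and
-- i > len(A) (A raises IndexError at the top level).
def Pre_MaxDiff_Aux (A : List Int) (i : Int) : Prop := 0 ≤ i ∧ i ≤ A.length
instance (A : List Int) (i : Int) : Decidable (Pre_MaxDiff_Aux A i) := by unfold Pre_MaxDiff_Aux; infer_instance
def pvWitness_MaxDiff_Aux : List Int × Int := ([3, -5, 2], 3)

def Spec_MaxDiff_Aux (A : List Int) (i : Int) (out : Int) : Prop := out = MaxDiff_Aux_alt A i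
instance (A : List Int) (i : Int) (out : Int) : Decidable (Spec_MaxDiff_Aux A i out) := by unfold Spec_MaxDiff_Aux; infer_instance

-- ===== CLAIM (what is proved, stated in full; the proofs are below) =====
def Claim_equal_MaxDiff_Aux : Prop := ∀ (A : List Int) (i : Int), Dom_MaxDiff_Aux A i → Pre_MaxDiff_Aux A i → Spec_MaxDiff_Aux A i (MaxDiff_Aux A i)

-- ===== LEMMAS AND PROOFS =====
-- The recursion and the loop compute the same value at every fuel/loop length n.
theorem MaxDiff_AuxGo_eq_foldl (A : List Int) (n : Nat) :
    MaxDiff_AuxGo A n =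
      (PySem.List.pyRange 0 (n : Int) 1).foldl (fun s k =>
        let l := s + PySem.List.pyGetD A k 0
        let r := s - PySem.List.pyGetD A k 0
        if |l| < |r| then l else r) 0 := by
  induction n with
  | zero => simp [MaxDiff_AuxGo, PySem.List.pyRange_one_eq_nil]
  | succ n ih =>
    have h : PySem.List.pyRange 0 ((n : Int) + 1) 1 =
        PySem.List.pyRange 0 (n : Int) 1 ++ [(n : Int)] :=
      PySem.List.pyRange_one_succ_right (by positivity)
    simp only [Nat.cast_add, Nat.cast_one, h, List.foldl_append, List.foldl_cons, List.foldl_nil]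
    simp [MaxDiff_AuxGo, ih]

-- ===== VERDICT (by name: the statement is the Claim_ definition above) =====
theorem MaxDiff_Aux_spec : Claim_equal_MaxDiff_Aux := by
  intro A i _ hpre
  unfold Spec_MaxDiff_Aux MaxDiff_Aux MaxDiff_Aux_alt
  rw [MaxDiff_AuxGo_eq_foldl]
  have : ((i.toNat : Int)) = i := Int.toNat_of_nonneg hpre.1
  rw [this]
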